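-- pv_equiv track=rewrite | github.com/tiitinha/adventofcode | AoC24/day7/python/day7.py | evaluate
-- ===== SOURCE A (Python) =====
-- def evaluate(inputs):
--     interim_results = set()
--     interim_results.add(inputs[0])
--
--     for input in inputs[1:]:
--         next_results = set()
--         for res in interim_results:
--             plus = res + input
--             mul = res * input
--             concat = int(str(res) + str(input))
--             next_results.add(plus)
--             next_results.add(mul)
--             next_results.add(concat)
--
--         interim_results = next_results
--
--     return interim_results
-- ===== SOURCE B (Python) =====
-- def evaluate(inputs):
--     results = set()
--
--     def go(cur, rest):
--         if not rest:
--             results.add(cur)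
--         else:
--             x = rest[0]
--             r = rest[1:]
--             go(cur + x, r)
--             go(cur * x, r)
--             go(int(str(cur) + str(x)), r)
--
--     go(inputs[0], inputs[1:])
--     return results
-- ===== Notes on version B (the rewrite author's own statement) =====
-- stated objective: alternative
-- what changed: Replaced the breadth-first level-by-level expansion that rebuilds a whole set of partial results for each input with a depth-first recursion that threads a single accumulated value and adds only completed results to one shared set.
-- outside the precondition, e.g. on evaluate([]): A raises IndexError, B raises IndexError; on evaluate([5, -3]): A raises ValueError, B raises ValueError
import Mathlib
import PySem

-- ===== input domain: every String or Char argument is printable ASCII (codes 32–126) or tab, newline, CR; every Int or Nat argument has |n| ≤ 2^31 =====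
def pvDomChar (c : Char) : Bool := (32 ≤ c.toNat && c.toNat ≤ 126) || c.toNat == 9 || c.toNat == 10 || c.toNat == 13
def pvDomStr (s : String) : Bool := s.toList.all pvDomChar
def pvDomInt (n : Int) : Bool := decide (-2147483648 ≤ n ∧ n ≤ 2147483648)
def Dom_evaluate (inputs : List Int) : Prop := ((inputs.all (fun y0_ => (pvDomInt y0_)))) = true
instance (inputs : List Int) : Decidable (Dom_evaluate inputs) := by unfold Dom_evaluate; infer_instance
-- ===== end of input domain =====

-- ===== PORT A =====
-- Re-implementation objective: alternative — depth-first recursion threading one value instead of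
-- breadth-first level-by-level set expansion. Equivalence is about the RETURN value (the set).

-- int(str(res) + str(input)); total form: inside Pre_ the string always parses (getD never hit there)
def pyConcat (res input : Int) : Int :=
  (PySem.Int.ofStr? (PySem.Int.toStr res ++ PySem.Int.toStr input)).getD 0

def evaluate (inputs : List Int) : List Int :=
  let interim0 : PySem.Set Int :=
    PySem.Set.add PySem.Set.empty ((PySem.List.pyGet? inputs 0).getD 0)
  (PySem.List.slice inputs (some 1) none).foldl
    (fun interim input =>
      interim.foldl
        (fun next res =>
          PySem.Set.add
            (PySem.Set.add (PySem.Set.add next (res + input)) (res * input))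
            (pyConcat res input))
        PySem.Set.empty)
    interim0

-- ===== PORT B =====
-- go(cur, rest): depth-first recursion, `results` threaded as the accumulator `acc`
def evalGo (acc : PySem.Set Int) (cur : Int) (rest : List Int) : PySem.Set Int :=
  match rest with
  | [] => PySem.Set.add acc cur
  | x :: r =>
    evalGo (evalGo (evalGo acc (cur + x) r) (cur * x) r) (pyConcat cur x) r

def evaluate_alt (inputs : List Int) : List Int :=
  evalGo PySem.Set.empty ((PySem.List.pyGet? inputs 0).getD 0)
    (PySem.List.slice inputs (some 1) none)

-- ===== PRECONDITION & SPEC =====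
-- Pre_ excludes exactly the inputs where A raises: the empty list (IndexError on inputs[0]) and
-- lists with a negative element after the first (int(str(res)+str(input)) → ValueError, since
-- str(input) then carries an interior '-').
def Pre_evaluate (inputs : List Int) : Prop :=
  inputs ≠ [] ∧ ∀ x ∈ inputs.tail, 0 ≤ x
instance (inputs : List Int) : Decidable (Pre_evaluate inputs) := by
  unfold Pre_evaluate; infer_instance
def pvWitness_evaluate : List Int := [2, 3, 5]

def Spec_evaluate (inputs : List Int) (out : List Int) : Prop := out = evaluate_alt inputs
instance (inputs : List Int) (out : List Int) : Decidable (Spec_evaluate inputs out) := by unfold Spec_evaluate; infer_instance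

-- ===== CLAIM (what is proved, stated in full; the proofs are below) =====
def Claim_equal_evaluate : Prop := ∀ (inputs : List Int), Dom_evaluate inputs → Pre_evaluate inputs → Spec_evaluate inputs (evaluate inputs)

-- ===== LEMMAS AND PROOFS =====

-- helper defs for the proofs only
def triple (x c : Int) : List Int := [c + x, c * x, pyConcat c x]

def updF (g : Int → List Int) (s : PySem.Set Int) (L : List Int) : PySem.Set Int :=
  L.foldl (fun s c => PySem.Set.update s (g c)) s

-- the DFS leaf sequence (with duplicates) of partial value `cur` over remaining inputs `rest`
def leavesOf (cur : Int) : List Int → List Int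
  | [] => [cur]
  | x :: r => leavesOf (cur + x) r ++ leavesOf (cur * x) r ++ leavesOf (pyConcat cur x) r

theorem update_append (s : PySem.Set Int) (a b : List Int) :
    PySem.Set.update s (a ++ b) = PySem.Set.update (PySem.Set.update s a) b := by
  simp [PySem.Set.update, List.foldl_append]

-- B's recursion appends (set-wise) its leaf sequence to the accumulator
theorem evalGo_eq_update (rest : List Int) : ∀ (acc : PySem.Set Int) (cur : Int),
    evalGo acc cur rest = PySem.Set.update acc (leavesOf cur rest) := by
  induction rest with
  | nil => intro acc cur; rfl
  | cons x r ih =>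
    intro acc cur
    simp only [evalGo, leavesOf, ih, update_append]

theorem update_of_subset {s : PySem.Set Int} {xs : List Int}
    (h : ∀ y ∈ xs, y ∈ s) : PySem.Set.update s xs = s := by
  induction xs generalizing s with
  | nil => rfl
  | cons x xs ih =>
    rw [PySem.Set.update_cons, PySem.Set.add_of_mem (h x (by simp))]
    exact ih fun y hy => h y (by simp [hy])

theorem updF_cons (g : Int → List Int) (s : PySem.Set Int) (c : Int) (L : List Int) :
    updF g s (c :: L) = updF g (PySem.Set.update s (g c)) L := rfl

theorem updF_append (g : Int → List Int) (s : PySem.Set Int) (a b : List Int) :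
    updF g s (a ++ b) = updF g (updF g s a) b := by
  simp [updF, List.foldl_append]

-- generalized dedup-absorption invariant
theorem updF_foldl_add (g : Int → List Int) (L : List Int) :
    ∀ (d : List Int) (s : PySem.Set Int),
    (∀ c ∈ d, ∀ y ∈ g c, y ∈ updF g s d) →
    updF g s (L.foldl PySem.Set.add d) = updF g (updF g s d) L := by
  induction L with
  | nil => intro d s _; rfl
  | cons c L ih =>
    intro d s h
    by_cases hc : c ∈ d
    · rw [List.foldl_cons, PySem.Set.add_of_mem hc, ih d s h, updF_cons,
        update_of_subset (h c hc)]
    · rw [List.foldl_cons, PySem.Set.add_of_not_mem hc]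
      have h' : ∀ c' ∈ d ++ [c], ∀ y ∈ g c', y ∈ updF g s (d ++ [c]) := by
        intro c' hc' y hy
        rw [updF_append]
        rcases List.mem_append.1 hc' with hd | he
        · exact (PySem.Set.mem_update _ _ _).2 (Or.inl (h c' hd y hy))
        · simp only [List.mem_singleton] at he
          subst he
          exact (PySem.Set.mem_update _ _ _).2 (Or.inr hy)
      rw [ih (d ++ [c]) s h', updF_append]
      rfl

-- folding block-updates over set(L) is the same as folding them over L
theorem updF_ofList (g : Int → List Int) (s : PySem.Set Int) (L : List Int) :
    updF g s (PySem.Set.ofList L) = updF g s L := by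
  rw [PySem.Set.ofList_eq_foldl, updF_foldl_add g L [] s (by simp [updF])]
  rfl

theorem updF_flatMap (g : Int → List Int) (s : PySem.Set Int) (L : List Int) :
    updF g s L = PySem.Set.update s (L.flatMap g) := by
  induction L generalizing s with
  | nil => rfl
  | cons c L ih => rw [updF_cons, ih, List.flatMap_cons, update_append]

-- the inner loop of A is a block-update fold
theorem inner_eq_updF (x : Int) (interim : PySem.Set Int) :
    interim.foldl
      (fun next res =>
        PySem.Set.add
          (PySem.Set.add (PySem.Set.add next (res + x)) (res * x))
          (pyConcat res x))
      PySem.Set.empty = updF (triple x) PySem.Set.empty interim := by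
  rfl

-- BFS main lemma: the level-by-level fold from set(L) yields the deduped DFS leaf sequence
theorem bfs_eq (tail : List Int) : ∀ (L : List Int),
    tail.foldl
      (fun interim input =>
        interim.foldl
          (fun next res =>
            PySem.Set.add
              (PySem.Set.add (PySem.Set.add next (res + input)) (res * input))
              (pyConcat res input))
          PySem.Set.empty)
      (PySem.Set.ofList L)
    = PySem.Set.ofList (L.flatMap (fun c => leavesOf c tail)) := by
  induction tail with
  | nil => intro L; simp [leavesOf]
  | cons x r ih =>
    intro L
    rw [List.foldl_cons, inner_eq_updF, updF_ofList, updF_flatMap,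
      PySem.Set.update_empty, ih (L.flatMap (triple x))]
    rw [List.flatMap_assoc]
    simp [triple, leavesOf, List.flatMap_cons]

-- ===== VERDICT (by name: the statement is the Claim_ definition above) =====
theorem evaluate_spec : Claim_equal_evaluate := by
  intro inputs _ _
  unfold Spec_evaluate
  show evaluate inputs = evaluate_alt inputs
  unfold evaluate evaluate_alt
  rw [evalGo_eq_update, PySem.Set.update_empty]
  have h1 : PySem.Set.add PySem.Set.empty ((PySem.List.pyGet? inputs 0).getD 0)
      = PySem.Set.ofList [((PySem.List.pyGet? inputs 0).getD 0)] := rfl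
  rw [h1, bfs_eq]
  simp
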